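-- pv_equiv track=rewrite | github.com/Oyaki122/infoexp-cloud | import boto3.py | distribute_files
-- ===== SOURCE A (Python) =====
-- import math
--
-- def distribute_files(files, users):
--
--     files_per_user = math.ceil(len(files["files"]) / len(users["users"]))
--     user_files = {}
--     for i in range(len(users["users"])):
--         start_idx = i * files_per_user
--         end_idx = start_idx + files_per_user
--         user_files[users["users"][i]["id"]] = files["files"][start_idx:end_idx]
--     return user_files
-- ===== SOURCE B (Python) =====
-- def distribute_files(files, users):
--     fs = files["files"]
--     us = users["users"]
--     fpu = (len(fs) + len(us) - 1) // len(us)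
--     chunks = []
--     cur = []
--     for f in fs:
--         cur.append(f)
--         if len(cur) == fpu:
--             chunks.append(cur)
--             cur = []
--     if cur:
--         chunks.append(cur)
--     chunks += [[]] * (len(us) - len(chunks))
--     return {u["id"]: c for u, c in zip(us, chunks)}
-- ===== Notes on version B (the rewrite author's own statement) =====
-- stated objective: alternative
-- what changed: Instead of computing a per-user slice of the file list for every user index, B makes a single accumulator pass over the files that groups them into chunks of size ceil(F/U) (computed as (F+U-1)//U instead of math.ceil), pads the chunk list with empty lists, and zips it with the users into the result dict; duplicate user ids overwrite as in A.
import Mathlib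
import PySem

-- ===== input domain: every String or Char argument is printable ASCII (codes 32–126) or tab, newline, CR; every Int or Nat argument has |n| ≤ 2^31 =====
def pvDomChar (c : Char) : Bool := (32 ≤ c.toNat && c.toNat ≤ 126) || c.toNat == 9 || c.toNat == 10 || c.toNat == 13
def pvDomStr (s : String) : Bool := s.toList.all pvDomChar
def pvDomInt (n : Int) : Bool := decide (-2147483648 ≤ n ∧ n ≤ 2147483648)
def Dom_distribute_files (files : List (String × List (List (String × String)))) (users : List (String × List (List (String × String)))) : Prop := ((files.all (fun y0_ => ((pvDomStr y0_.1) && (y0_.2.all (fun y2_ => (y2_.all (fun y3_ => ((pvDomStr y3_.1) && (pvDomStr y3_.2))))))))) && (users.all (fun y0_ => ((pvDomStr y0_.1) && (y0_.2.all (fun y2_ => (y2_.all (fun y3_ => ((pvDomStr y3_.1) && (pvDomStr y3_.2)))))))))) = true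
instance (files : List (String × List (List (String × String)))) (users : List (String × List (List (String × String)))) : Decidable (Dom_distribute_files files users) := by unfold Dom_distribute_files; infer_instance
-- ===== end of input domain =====

-- B replaces the per-user-index slicing by one accumulator pass over the files that groups them
-- into chunks of size ceil(F/U) (computed as (F+U-1)//U), pads with empty chunks, and zips the
-- chunk list with the users — a different decomposition of the same task (same cost).

-- ===== PORT A =====
-- math.ceil(len(fs)/len(us)) is ported as the exact integer ceiling -((-n) // u): float division of
-- two list lengths (far below 2^52) followed by math.ceil is exact and equals this value.
def distribute_files (files : List (String × List (List (String × String)))) (users : List (String × List (List (String × String)))) : List (String × List (List (String × String))) :=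
  let fsL := ((PySem.Dict.mk files).get? "files").getD []
  let usL := ((PySem.Dict.mk users).get? "users").getD []
  let fpu : Int := -(PySem.Int.floordiv (-(fsL.length : Int)) (usL.length : Int))
  ((PySem.List.pyRange 0 (usL.length : Int) 1).foldl (fun d i =>
      d.insert (((PySem.Dict.mk (PySem.List.pyGetD usL i [])).get? "id").getD "")
        (PySem.List.slice fsL (some (i * fpu)) (some (i * fpu + fpu))))
    PySem.Dict.empty).items

-- ===== PORT B =====
def distribute_files_alt (files : List (String × List (List (String × String)))) (users : List (String × List (List (String × String)))) : List (String × List (List (String × String))) :=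
  let fsL := ((PySem.Dict.mk files).get? "files").getD []
  let usL := ((PySem.Dict.mk users).get? "users").getD []
  let fpu : Int := PySem.Int.floordiv ((fsL.length : Int) + (usL.length : Int) - 1) (usL.length : Int)
  let st := fsL.foldl (fun (st : List (List (List (String × String))) × List (List (String × String))) f =>
      let c := st.2 ++ [f]
      if (c.length : Int) = fpu then (st.1 ++ [c], []) else (st.1, c)) ([], [])
  let chunks := st.1 ++ (if st.2 ≠ [] then [st.2] else [])
  let padded := chunks ++ List.replicate (usL.length - chunks.length) ([] : List (List (String × String)))
  ((usL.zip padded).foldl (fun d p =>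
      d.insert (((PySem.Dict.mk p.1).get? "id").getD "") p.2) PySem.Dict.empty).items

-- ===== PRECONDITION & SPEC =====
-- Pre_ excludes exactly the inputs where Python A raises: a missing "files"/"users" key (KeyError),
-- an empty user list (ZeroDivisionError), and a listed user without an "id" key (KeyError).
def Pre_distribute_files (files : List (String × List (List (String × String)))) (users : List (String × List (List (String × String)))) : Prop :=
  ((PySem.Dict.mk files).get? "files").isSome = true ∧
  ((PySem.Dict.mk users).get? "users").isSome = true ∧
  ((PySem.Dict.mk users).get? "users").getD [] ≠ [] ∧
  ∀ u ∈ ((PySem.Dict.mk users).get? "users").getD [], ((PySem.Dict.mk u).get? "id").isSome = true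
instance (files : List (String × List (List (String × String)))) (users : List (String × List (List (String × String)))) : Decidable (Pre_distribute_files files users) := by unfold Pre_distribute_files; infer_instance
def pvWitness_distribute_files : (List (String × List (List (String × String)))) × (List (String × List (List (String × String)))) :=
  ([("files", [[("n", "0")], [("n", "1")]])], [("users", [[("id", "a")], [("id", "b")]])])

def Spec_distribute_files (files : List (String × List (List (String × String)))) (users : List (String × List (List (String × String)))) (out : List (String × List (List (String × String)))) : Prop := out = distribute_files_alt files users
instance (files : List (String × List (List (String × String)))) (users : List (String × List (List (String × String)))) (out : List (String × List (List (String × String)))) : Decidable (Spec_distribute_files files users out) := by unfold Spec_distribute_files; infer_instance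

-- ===== CLAIM (what is proved, stated in full; the proofs are below) =====
def Claim_equal_distribute_files : Prop := ∀ (files : List (String × List (List (String × String)))) (users : List (String × List (List (String × String)))), Dom_distribute_files files users → Pre_distribute_files files users → Spec_distribute_files files users (distribute_files files users)

-- ===== LEMMAS AND PROOFS =====

-- Proof-side spec of B's grouping pass: successive take/drop chunks of size n (fuel for totality).
def pvChunksTD {α : Type} (n : Nat) : Nat → List α → List (List α)
  | _, [] => []
  | 0, _ :: _ => []
  | fuel+1, x :: l => ((x :: l).take n) :: pvChunksTD n fuel ((x :: l).drop n)

lemma pvChunksTD_cons {α : Type} (n fuel : Nat) (l : List α) (h : l ≠ []) :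
    pvChunksTD n (fuel+1) l = l.take n :: pvChunksTD n fuel (l.drop n) := by
  cases l with
  | nil => exact absurd rfl h
  | cons x t => rfl

lemma pvChunksTD_getD {α : Type} (n : Nat) (hn : 0 < n) :
    ∀ (fuel : Nat) (l : List α) (i : Nat), l.length ≤ fuel →
      (pvChunksTD n fuel l).getD i [] = (l.drop (i*n)).take n := by
  intro fuel
  induction fuel with
  | zero =>
    intro l i h
    have : l = [] := List.eq_nil_of_length_eq_zero (by omega)
    subst this; simp [pvChunksTD]
  | succ g ih =>
    intro l i h
    cases l with
    | nil => simp [pvChunksTD]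
    | cons x t =>
      rw [pvChunksTD_cons n g (x :: t) (by simp)]
      cases i with
      | zero => simp
      | succ j =>
        rw [List.getD_cons_succ, ih ((x :: t).drop n) j (by simp only [List.length_drop, List.length_cons] at h ⊢; omega)]
        rw [List.drop_drop, show n + j * n = (j+1)*n by ring]

-- B's accumulator pass produces exactly the take/drop chunks.
lemma pv_fold_group {α : Type} (n : Nat) (hn : 0 < n) :
    ∀ (fs : List α) (fuel : Nat) (cs : List (List α)) (cur : List α),
      cur.length + fs.length ≤ fuel → cur.length < n →
      (let st := fs.foldl (fun (st : List (List α) × List α) f =>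
          let c := st.2 ++ [f]
          if (c.length : Int) = (n : Int) then (st.1 ++ [c], []) else (st.1, c)) (cs, cur)
       st.1 ++ (if st.2 ≠ [] then [st.2] else []))
      = cs ++ pvChunksTD n fuel (cur ++ fs) := by
  intro fs
  induction fs with
  | nil =>
    intro fuel cs cur hf hc
    simp only [List.foldl_nil, List.append_nil]
    cases cur with
    | nil => simp [pvChunksTD]
    | cons x t =>
      have hf1 : ∃ g, fuel = g + 1 := by cases fuel with | zero => simp at hf | succ g => exact ⟨g, rfl⟩
      obtain ⟨g, rfl⟩ := hf1
      rw [pvChunksTD_cons n g (x :: t) (by simp)]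
      rw [List.take_of_length_le (by simp at hc ⊢; omega), List.drop_eq_nil_of_le (by simp at hc ⊢; omega)]
      simp [pvChunksTD]
  | cons f rest ih =>
    intro fuel cs cur hf hc
    simp only [List.foldl_cons]
    by_cases he : (cur ++ [f]).length = n
    · have hfu : ∃ g, fuel = g + 1 := by
        cases fuel with
        | zero => simp at hf
        | succ g => exact ⟨g, rfl⟩
      obtain ⟨g, rfl⟩ := hfu
      rw [if_pos (by exact_mod_cast he)]
      rw [ih g (cs ++ [cur ++ [f]]) [] (by simp at hf ⊢; omega) hn]
      rw [pvChunksTD_cons n g (cur ++ f :: rest) (by simp)]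
      have hsplit : cur ++ f :: rest = (cur ++ [f]) ++ rest := by simp
      rw [hsplit, List.take_left' he, List.drop_left' he]
      simp
    · have hlt : (cur ++ [f]).length < n := by simp at he hc ⊢; omega
      rw [if_neg (by exact_mod_cast he)]
      rw [ih fuel cs (cur ++ [f]) (by simp at hf ⊢; omega) hlt]
      simp

lemma pv_getD_append_replicate {α : Type} (l : List (List α)) (k i : Nat) :
    (l ++ List.replicate k ([] : List α)).getD i [] = l.getD i [] := by
  rcases lt_or_ge i l.length with h | h
  · rw [List.getD_append _ _ _ _ h]
  · rw [List.getD_eq_default _ _ h]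
    simp [List.getD, List.getElem?_append_right h, List.getElem?_replicate]
    split <;> simp

-- zip with a long-enough list, seen through enumerate.
lemma pv_zip_enumerate {U C : Type} (us : List U) (pd : List C) (dc : C)
    (h : us.length ≤ pd.length) :
    us.zip pd = (PySem.List.enumerate us 0).map (fun p => (p.2, pd.getD p.1.toNat dc)) := by
  apply List.ext_getElem
  · simp [PySem.List.length_enumerate]; omega
  · intro i h1 h2
    have hi : i < us.length := by simpa [PySem.List.length_enumerate] using h2
    simp [List.getElem_zip, PySem.List.getElem_enumerate]
    rw [List.getElem?_eq_getElem (show i < pd.length by omega)]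
    rfl

-- (F+U-1)//U is the ceiling -((-F)//U).
lemma pv_fpu_eq (F U : Int) (hu : 0 < U) :
    PySem.Int.floordiv (F + U - 1) U = -(PySem.Int.floordiv (-F) U) := by
  have h := (PySem.Int.floordiv_eq_iff_of_pos hu (a := F + U - 1)
      (q := PySem.Int.floordiv (F + U - 1) U)).mp rfl
  symm
  rw [PySem.Int.neg_floordiv_neg_eq_iff_of_pos hu]
  constructor <;> nlinarith [h.1, h.2]

-- fpu ≥ 1 when there is at least one file.
lemma pv_fpu_pos (F U : Int) (hu : 0 < U) (hF : 0 < F) :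
    0 < PySem.Int.floordiv (F + U - 1) U := by
  rw [show (0 : Int) < PySem.Int.floordiv (F + U - 1) U ↔ 1 ≤ PySem.Int.floordiv (F + U - 1) U by omega]
  rw [PySem.Int.le_floordiv_iff_mul_le hu]
  omega

-- A's slicing loop equals B's chunk-assembly loop, over the extracted lists.
lemma pv_core (fsL usL : List (List (String × String))) (hne : usL ≠ []) :
    ((PySem.List.pyRange 0 (usL.length : Int) 1).foldl (fun d i =>
        d.insert (((PySem.Dict.mk (PySem.List.pyGetD usL i [])).get? "id").getD "")
          (PySem.List.slice fsL (some (i * (-(PySem.Int.floordiv (-(fsL.length : Int)) (usL.length : Int))))) (some (i * (-(PySem.Int.floordiv (-(fsL.length : Int)) (usL.length : Int))) + (-(PySem.Int.floordiv (-(fsL.length : Int)) (usL.length : Int)))))))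
      PySem.Dict.empty)
    = ((usL.zip (((fsL.foldl (fun (st : List (List (List (String × String))) × List (List (String × String))) f =>
        let c := st.2 ++ [f]
        if (c.length : Int) = (PySem.Int.floordiv ((fsL.length : Int) + (usL.length : Int) - 1) (usL.length : Int)) then (st.1 ++ [c], []) else (st.1, c)) ([], [])).1 ++ (if (fsL.foldl (fun (st : List (List (List (String × String))) × List (List (String × String))) f =>
        let c := st.2 ++ [f]
        if (c.length : Int) = (PySem.Int.floordiv ((fsL.length : Int) + (usL.length : Int) - 1) (usL.length : Int)) then (st.1 ++ [c], []) else (st.1, c)) ([], [])).2 ≠ [] then [(fsL.foldl (fun (st : List (List (List (String × String))) × List (List (String × String))) f =>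
        let c := st.2 ++ [f]
        if (c.length : Int) = (PySem.Int.floordiv ((fsL.length : Int) + (usL.length : Int) - 1) (usL.length : Int)) then (st.1 ++ [c], []) else (st.1, c)) ([], [])).2] else [])) ++ List.replicate (usL.length - ((fsL.foldl (fun (st : List (List (List (String × String))) × List (List (String × String))) f =>
        let c := st.2 ++ [f]
        if (c.length : Int) = (PySem.Int.floordiv ((fsL.length : Int) + (usL.length : Int) - 1) (usL.length : Int)) then (st.1 ++ [c], []) else (st.1, c)) ([], [])).1 ++ (if (fsL.foldl (fun (st : List (List (List (String × String))) × List (List (String × String))) f =>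
        let c := st.2 ++ [f]
        if (c.length : Int) = (PySem.Int.floordiv ((fsL.length : Int) + (usL.length : Int) - 1) (usL.length : Int)) then (st.1 ++ [c], []) else (st.1, c)) ([], [])).2 ≠ [] then [(fsL.foldl (fun (st : List (List (List (String × String))) × List (List (String × String))) f =>
        let c := st.2 ++ [f]
        if (c.length : Int) = (PySem.Int.floordiv ((fsL.length : Int) + (usL.length : Int) - 1) (usL.length : Int)) then (st.1 ++ [c], []) else (st.1, c)) ([], [])).2] else [])).length) ([] : List (List (String × String))))).foldl (fun d p =>
        d.insert (((PySem.Dict.mk p.1).get? "id").getD "") p.2) PySem.Dict.empty) := by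
  have hu : 0 < (usL.length : Int) := by
    have := List.length_pos_of_ne_nil hne
    exact_mod_cast this
  have hfpu : (PySem.Int.floordiv ((fsL.length : Int) + (usL.length : Int) - 1) (usL.length : Int)) = (-(PySem.Int.floordiv (-(fsL.length : Int)) (usL.length : Int))) := pv_fpu_eq _ _ hu
  rw [pv_zip_enumerate usL _ ([] : List (List (String × String)))
      (by simp only [List.length_append, List.length_replicate]; omega)]
  rw [PySem.List.enumerate_eq_map_pyRange usL ([] : List (String × String)), List.map_map, List.foldl_map]
  apply PySem.List.foldl_congr_mem
  intro acc i hm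
  obtain ⟨hi0, hiU⟩ := PySem.List.mem_pyRange_one.mp hm
  simp only [Function.comp_apply]
  congr 1
  rw [pv_getD_append_replicate]
  by_cases hfs : fsL = []
  · subst hfs
    have h0 : (-(PySem.Int.floordiv (-(([] : List (List (String × String))).length : Int)) (usL.length : Int))) = 0 := by
      simp [PySem.Int.floordiv_eq_ediv_of_pos hu]
    rw [h0]
    simp only [mul_zero, add_zero]
    rw [PySem.List.slice_toNat ([] : List (List (String × String))) le_rfl le_rfl]
    simp
  · have hF : 0 < (fsL.length : Int) := by
      have := List.length_pos_of_ne_nil hfs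
      exact_mod_cast this
    have hpos : 0 < (-(PySem.Int.floordiv (-(fsL.length : Int)) (usL.length : Int))) := hfpu ▸ pv_fpu_pos _ _ hu hF
    obtain ⟨n, hn⟩ : ∃ n : Nat, (-(PySem.Int.floordiv (-(fsL.length : Int)) (usL.length : Int))) = (n : Int) := ⟨_, (Int.toNat_of_nonneg hpos.le).symm⟩
    obtain ⟨k, hk⟩ : ∃ k : Nat, i = (k : Int) := ⟨_, (Int.toNat_of_nonneg hi0).symm⟩
    have hn0 : 0 < n := by omega
    rw [hfpu, hn]
    have hgrp := pv_fold_group n hn0 fsL fsL.length ([] : List (List (List (String × String)))) [] (by simp) hn0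
    simp only [List.nil_append] at hgrp
    rw [hgrp, pvChunksTD_getD n hn0 fsL.length fsL _ le_rfl]
    rw [hk, show ((k : Int) * (n : Int)) = ((k * n : Nat) : Int) by push_cast; ring]
    rw [PySem.List.slice_natCast_add]
    rw [show ((k : Int)).toNat = k by omega]
-- ===== VERDICT (by name: the statement is the Claim_ definition above) =====
theorem distribute_files_spec : Claim_equal_distribute_files := by
  intro files users _ hpre
  obtain ⟨-, -, hne, -⟩ := hpre
  unfold Spec_distribute_files
  simp only [distribute_files, distribute_files_alt]
  exact congrArg PySem.Dict.items (pv_core _ _ hne)
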